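-- pv_equiv track=rewrite | github.com/agrc/AmdImportHelper | buffer_parser.py | get_params_txt
-- ===== SOURCE A (Python) =====
-- def get_params_txt(pairs, indent):
--     package = None
--     txt = ''
--
--     for p in pairs:
--         new_package = p[0].split('/')[0]
--         if not p[1] is None:
--             if package is None:
--                 package = new_package
--             elif package != new_package:
--                 txt += ',\n'
--                 package = new_package
--             else:
--                 txt += ','
--
--             txt += '\n    ' + p[1]
--
--     txt += '\n'
--
--     return txt
-- ===== SOURCE B (Python) =====
-- def _group_runs(entries):
--     """Split (package, value) entries into maximal consecutive runs of equal package."""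
--     if not entries:
--         return []
--     pkg, first = entries[0]
--     i = 1
--     while i < len(entries) and entries[i][0] == pkg:
--         i += 1
--     return [(pkg, [first] + [v for _, v in entries[1:i]])] + _group_runs(entries[i:])
--
--
-- def get_params_txt(pairs, indent):
--     entries = [(p[0].split('/')[0], p[1]) for p in pairs if p[1] is not None]
--     runs = _group_runs(entries)
--     body = ',\n\n    '.join(',\n    '.join(vals) for _, vals in runs)
--     return ('\n    ' + body if runs else '') + '\n'
-- ===== Notes on version B (the rewrite author's own statement) =====
-- stated objective: alternative
-- what changed: A streams through the pairs with a current-package state machine appending separators to a growing string; B maps the pairs to (package, value) entries, groups them into maximal consecutive runs of equal package, and joins values within a run with ',\n ' and runs with ',\n\n '.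
import Mathlib
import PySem

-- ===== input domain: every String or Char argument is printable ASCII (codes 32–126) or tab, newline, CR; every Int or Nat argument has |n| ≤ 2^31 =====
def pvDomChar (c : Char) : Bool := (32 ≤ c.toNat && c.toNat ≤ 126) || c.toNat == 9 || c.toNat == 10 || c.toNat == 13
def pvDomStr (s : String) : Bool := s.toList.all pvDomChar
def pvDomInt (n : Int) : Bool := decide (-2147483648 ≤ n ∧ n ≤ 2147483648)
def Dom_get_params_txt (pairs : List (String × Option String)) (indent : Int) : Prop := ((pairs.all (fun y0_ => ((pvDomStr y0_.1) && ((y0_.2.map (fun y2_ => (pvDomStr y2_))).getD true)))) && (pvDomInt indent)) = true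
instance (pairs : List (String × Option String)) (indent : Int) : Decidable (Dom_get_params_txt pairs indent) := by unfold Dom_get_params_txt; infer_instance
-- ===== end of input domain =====

-- B replaces A's streaming state machine (current package + growing text) by a map/filter
-- to (package, value) entries, grouping into consecutive runs and joining with separators;
-- objective: alternative decomposition, same cost.

-- ===== PORT A =====
-- A's loop body; p[0].split('/') is never empty (sep ≠ ""), so [0] is its head.
def pvStepA (st : Option String × String) (p : String × Option String) : Option String × String :=
  let new_package := ((PySem.Str.split? p.1 "/").getD []).headD ""
  match p.2 with
  | none => st
  | some v =>
    match st.1 with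
    | none => (some new_package, st.2 ++ ("\n    " ++ v))
    | some package =>
      if package ≠ new_package then (some new_package, st.2 ++ ",\n" ++ ("\n    " ++ v))
      else (some package, st.2 ++ "," ++ ("\n    " ++ v))

def get_params_txt (pairs : List (String × Option String)) (indent : Int) : String :=
  (pairs.foldl pvStepA (none, "")).2 ++ "\n"

-- ===== PORT B =====
-- p[0].split('/')[0]; the split list is never empty, so [0] is its head.
def pvPkg (s : String) : String := ((PySem.Str.split? s "/").getD []).headD ""

-- Source B's _group_runs: maximal consecutive runs of equal package.
def pvGroupRuns : List (String × String) → List (String × List String)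
  | [] => []
  | (pkg, first) :: rest =>
    (pkg, first :: (rest.takeWhile (fun e => e.1 == pkg)).map Prod.snd)
      :: pvGroupRuns (rest.dropWhile (fun e => e.1 == pkg))
termination_by es => es.length
decreasing_by
  simp only [List.length_cons]
  exact Nat.lt_succ_of_le (List.length_dropWhile_le _ _)

def get_params_txt_alt (pairs : List (String × Option String)) (indent : Int) : String :=
  let entries := pairs.filterMap (fun p => p.2.map (fun v => (pvPkg p.1, v)))
  let runs := pvGroupRuns entries
  let body := PySem.Str.join ",\n\n    " (runs.map (fun r => PySem.Str.join ",\n    " r.2))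
  (if runs.isEmpty then "" else "\n    " ++ body) ++ "\n"

-- ===== PRECONDITION & SPEC =====
def Spec_get_params_txt (pairs : List (String × Option String)) (indent : Int) (out : String) : Prop := out = get_params_txt_alt pairs indent
instance (pairs : List (String × Option String)) (indent : Int) (out : String) : Decidable (Spec_get_params_txt pairs indent out) := by unfold Spec_get_params_txt; infer_instance

-- ===== CLAIM (what is proved, stated in full; the proofs are below) =====
def Claim_equal_get_params_txt : Prop := ∀ (pairs : List (String × Option String)) (indent : Int), Dom_get_params_txt pairs indent → Spec_get_params_txt pairs indent (get_params_txt pairs indent)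

-- ===== LEMMAS AND PROOFS =====

-- A's step specialised to the entries that actually contribute text.
def pvStepE (st : Option String × String) (e : String × String) : Option String × String :=
  match st.1 with
  | none => (some e.1, st.2 ++ ("\n    " ++ e.2))
  | some package =>
    if package ≠ e.1 then (some e.1, st.2 ++ ",\n" ++ ("\n    " ++ e.2))
    else (some package, st.2 ++ "," ++ ("\n    " ++ e.2))

-- text contributed after the first entry, given the current package q
def pvG : String → List (String × String) → String
  | _, [] => ""
  | q, (p, v) :: es => ((if p == q then ",\n    " else ",\n\n    ") ++ v) ++ pvG p es

-- merging A's two-step appends into B's literals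
theorem pvLit_same (s : String) : "," ++ ("\n    " ++ s) = ",\n    " ++ s := by
  have h : ("," ++ "\n    " : String) = ",\n    " := rfl
  rw [← String.append_assoc, h]
theorem pvLit_diff (s : String) : ",\n" ++ ("\n    " ++ s) = ",\n\n    " ++ s := by
  have h : (",\n" ++ "\n    " : String) = ",\n\n    " := rfl
  rw [← String.append_assoc, h]

theorem pvStepA_eq (st : Option String × String) (p : String × Option String) :
    pvStepA st p = match p.2 with
      | none => st
      | some v => pvStepE st (pvPkg p.1, v) := by
  obtain ⟨a, b⟩ := p
  cases b <;> rfl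

theorem pvFold_entries (pairs : List (String × Option String)) (st : Option String × String) :
    pairs.foldl pvStepA st
      = (pairs.filterMap (fun p => p.2.map (fun v => (pvPkg p.1, v)))).foldl pvStepE st := by
  induction pairs generalizing st with
  | nil => rfl
  | cons p rest ih =>
    cases hv : p.2 with
    | none => simp [List.foldl_cons, hv, pvStepA_eq, ih]
    | some v => simp [List.foldl_cons, hv, pvStepA_eq, ih]

theorem pvFold_g (es : List (String × String)) : ∀ (q : String) (t : String),
    es.foldl pvStepE (some q, t) = (some (es.foldl (fun _ e => e.1) q), t ++ pvG q es) := by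
  induction es with
  | nil => intro q t; simp [pvG, String.append_empty]
  | cons e rest ih =>
    intro es_q es_t
    obtain ⟨p, v⟩ := e
    by_cases h : es_q = p
    · subst h
      have hstep : pvStepE (some es_q, es_t) (es_q, v)
          = (some es_q, es_t ++ ("," ++ ("\n    " ++ v))) := by
        simp [pvStepE, String.append_assoc]
      rw [List.foldl_cons, hstep, ih]
      simp [pvG, pvLit_same, String.append_assoc]
    · have hstep : pvStepE (some es_q, es_t) (p, v)
          = (some p, es_t ++ (",\n" ++ ("\n    " ++ v))) := by
        simp [pvStepE, h, String.append_assoc]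
      rw [List.foldl_cons, hstep, ih]
      have hbeq : (p == es_q) = false := by
        simp only [beq_eq_false_iff_ne]; exact fun hc => h hc.symm
      simp [pvG, hbeq, pvLit_diff, String.append_assoc]

-- closed form of A over the entry list
theorem pvA_closed (pairs : List (String × Option String)) (indent : Int) :
    get_params_txt pairs indent
      = (match pairs.filterMap (fun p => p.2.map (fun v => (pvPkg p.1, v))) with
          | [] => ""
          | (p, v) :: es => ("\n    " ++ v) ++ pvG p es) ++ "\n" := by
  unfold get_params_txt
  rw [pvFold_entries]
  cases hes : pairs.filterMap (fun p => p.2.map (fun v => (pvPkg p.1, v))) with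
  | nil => rfl
  | cons e rest =>
    obtain ⟨p, v⟩ := e
    have hstep : pvStepE (none, "") (p, v) = (some p, "\n    " ++ v) := by
      simp [pvStepE, String.empty_append]
    rw [List.foldl_cons, hstep, pvFold_g]

-- Str-level join unfoldings (derived from the Chars-level PySem lemmas)
theorem pvJoin_single (sep x : String) : PySem.Str.join sep [x] = x := by
  apply String.toList_inj.mp
  simp [PySem.Str.toList_join, PySem.Chars.join, List.intercalate]

theorem pvJoin_cons_cons (sep x y : String) (r : List String) :
    PySem.Str.join sep (x :: y :: r) = x ++ sep ++ PySem.Str.join sep (y :: r) := by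
  apply String.toList_inj.mp
  simp [PySem.Str.toList_join, PySem.Chars.join_cons_cons, String.toList_append]

-- join of a cons with a non-empty tail unfolds to one separator step
theorem pvJoin_cons_ne (sep x : String) (xs : List String) (h : xs ≠ []) :
    PySem.Str.join sep (x :: xs) = x ++ sep ++ PySem.Str.join sep xs := by
  cases xs with
  | nil => exact absurd rfl h
  | cons y r => exact pvJoin_cons_cons sep x y r

theorem pvGroupRuns_cons (p v : String) (es : List (String × String)) :
    pvGroupRuns ((p, v) :: es)
      = (p, v :: (es.takeWhile (fun e => e.1 == p)).map Prod.snd)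
          :: pvGroupRuns (es.dropWhile (fun e => e.1 == p)) := by
  rw [pvGroupRuns]

-- joining one run's values equals the streamed text of that run
theorem pvRun_join (same : List (String × String)) : ∀ (restR : List (String × String))
    (p v : String), (∀ e ∈ same, e.1 = p) →
    v ++ pvG p (same ++ restR)
      = PySem.Str.join ",\n    " (v :: same.map Prod.snd) ++ pvG p restR := by
  induction same with
  | nil => intro restR p v _; simp [pvJoin_single]
  | cons e tl ih =>
    intro restR p v hall
    obtain ⟨q, w⟩ := e
    have hq : q = p := hall (q, w) (List.mem_cons_self)
    subst hq
    have htl : ∀ e ∈ tl, e.1 = q := fun e he => hall e (List.mem_cons_of_mem _ he)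
    calc v ++ pvG q (((q, w) :: tl) ++ restR)
        = v ++ (",\n    " ++ (w ++ pvG q (tl ++ restR))) := by
          simp [pvG, String.append_assoc]
      _ = v ++ (",\n    " ++ (PySem.Str.join ",\n    " (w :: tl.map Prod.snd) ++ pvG q restR)) := by
          rw [ih restR q w htl]
      _ = PySem.Str.join ",\n    " (v :: w :: tl.map Prod.snd) ++ pvG q restR := by
          rw [pvJoin_cons_cons]
          simp [String.append_assoc]

-- main B-side lemma: run-grouped joining equals the streamed tail text
theorem pvB_main : ∀ (n : Nat) (es : List (String × String)), es.length ≤ n →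
    ∀ (p v : String),
    PySem.Str.join ",\n\n    "
        ((pvGroupRuns ((p, v) :: es)).map (fun r => PySem.Str.join ",\n    " r.2))
      = v ++ pvG p es := by
  intro n
  induction n with
  | zero =>
    intro es hle p v
    have : es = [] := List.length_eq_zero_iff.mp (Nat.le_zero.mp hle)
    subst this
    simp [pvGroupRuns_cons, pvGroupRuns, pvG, pvJoin_single, String.append_empty]
  | succ n ih =>
    intro es hle p v
    have hsplit : es.takeWhile (fun e => e.1 == p) ++ es.dropWhile (fun e => e.1 == p) = es :=
      List.takeWhile_append_dropWhile
    have hall : ∀ e ∈ es.takeWhile (fun e => e.1 == p), e.1 = p := by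
      intro e he
      have := List.mem_takeWhile_imp he
      simpa using this
    have hrun := pvRun_join (es.takeWhile (fun e => e.1 == p))
        (es.dropWhile (fun e => e.1 == p)) p v hall
    rw [hsplit] at hrun
    rw [pvGroupRuns_cons, List.map_cons]
    dsimp only
    cases hdrop : es.dropWhile (fun e => e.1 == p) with
    | nil =>
      rw [hdrop] at hrun
      simp only [pvG, String.append_empty] at hrun
      simp only [pvGroupRuns, List.map_nil]
      rw [pvJoin_single]
      exact hrun.symm
    | cons e tl =>
      obtain ⟨q, w⟩ := e
      have hqp : (q == p) = false := by
        have := List.head?_dropWhile_not (fun e => (e.1 == p)) es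
        rw [hdrop] at this; simpa using this
      have hlen : tl.length ≤ n := by
        have h1 : ((q, w) :: tl).length ≤ es.length := by
          rw [← hdrop]; exact List.length_dropWhile_le _ _
        simp only [List.length_cons] at h1
        omega
      have hrec := ih tl hlen q w
      have hne : ((pvGroupRuns ((q, w) :: tl)).map (fun r => PySem.Str.join ",\n    " r.2)) ≠ [] := by
        rw [pvGroupRuns_cons]; simp
      rw [hdrop] at hrun
      rw [pvJoin_cons_ne _ _ _ hne, hrec, hrun]
      simp [pvG, hqp, String.append_assoc]

-- ===== VERDICT (by name: the statement is the Claim_ definition above) =====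
theorem get_params_txt_spec : Claim_equal_get_params_txt := by
  unfold Claim_equal_get_params_txt Spec_get_params_txt
  intro pairs indent _
  rw [pvA_closed]
  unfold get_params_txt_alt
  cases hes : pairs.filterMap (fun p => p.2.map (fun v => (pvPkg p.1, v))) with
  | nil => simp [pvGroupRuns]
  | cons e es =>
    obtain ⟨p, v⟩ := e
    have hmain := pvB_main es.length es (le_refl _) p v
    simp only [pvGroupRuns_cons, List.isEmpty_cons, Bool.false_eq_true, if_false]
    rw [← pvGroupRuns_cons, hmain]
    simp [String.append_assoc]
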